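-- pv_equiv track=rewrite | github.com/sandeepny441/code_101 | Pradeep/arrays/easy_473.py | solve
-- ===== SOURCE A (Python) =====
-- def solve(nums):
--     max_profit = 0
--     cur = nums[0]
--     for i in range(1, len(nums)):
--         cur_profit = nums[i] - cur
--         if cur_profit > 0:
--             max_profit += cur_profit
--         cur = nums[i]
--     return max_profit
-- ===== SOURCE B (Python) =====
-- def solve(nums):
--     n = len(nums)
--     profit = 0
--     i = 0
--     while i + 1 < n:
--         # slide down to a valley
--         while i + 1 < n and nums[i + 1] <= nums[i]:
--             i += 1
--         valley = nums[i]
--         # climb up to the next peak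
--         while i + 1 < n and nums[i + 1] >= nums[i]:
--             i += 1
--         profit += nums[i] - valley
--     return profit
-- ===== Notes on version B (the rewrite author's own statement) =====
-- stated objective: alternative
-- what changed: Replaces the element-by-element sum of positive consecutive differences with a peak-valley traversal: recursion over down-runs and up-runs, adding peak minus valley per run.
import Mathlib
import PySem

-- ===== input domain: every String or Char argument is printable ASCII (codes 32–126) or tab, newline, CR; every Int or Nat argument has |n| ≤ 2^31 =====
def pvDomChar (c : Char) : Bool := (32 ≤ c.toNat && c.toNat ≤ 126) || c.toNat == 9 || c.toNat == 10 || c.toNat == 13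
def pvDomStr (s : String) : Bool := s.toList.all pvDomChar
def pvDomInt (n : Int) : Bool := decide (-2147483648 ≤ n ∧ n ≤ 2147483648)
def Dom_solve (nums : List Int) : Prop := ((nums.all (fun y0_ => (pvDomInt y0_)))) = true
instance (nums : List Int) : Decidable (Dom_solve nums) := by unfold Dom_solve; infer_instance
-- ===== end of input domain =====

-- B replaces the per-element positive-difference sum with an iterative peak-valley scan (valley-to-peak runs); alternative decomposition, same cost.


-- ===== PORT A =====
def solve (nums : List Int) : Int :=
  let maxProfit : Int := 0
  let cur : Int := PySem.List.pyGetD nums 0 0   -- first element; Pre_ excludes the empty list, where Python raises IndexError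
  let st := (PySem.List.pyRange 1 (nums.length : Int) 1).foldl
    (fun (s : Int × Int) i =>
      let x := PySem.List.pyGetD nums i 0
      let curProfit := x - s.2
      (if curProfit > 0 then s.1 + curProfit else s.1, x)) (maxProfit, cur)
  st.1

-- ===== PORT B =====
-- all B-side indices stay inside [0, n), so List.getD is exact for Python's nums[i]; each while-loop carries a fuel
-- argument (a totality guard only: fuel = nums.length always suffices, each iteration needs i + 1 < nums.length and bumps i)
-- inner loop 'while i + 1 < n and nums[i+1] <= nums[i]: i += 1' — returns the final i
def descendI (nums : List Int) (fuel : Nat) (i : Nat) : Nat :=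
  match fuel with
  | 0 => i
  | f + 1 =>
    if i + 1 < nums.length ∧ nums.getD (i + 1) 0 ≤ nums.getD i 0 then descendI nums f (i + 1) else i

-- inner loop 'while i + 1 < n and nums[i+1] >= nums[i]: i += 1' — returns the final i
def ascendI (nums : List Int) (fuel : Nat) (i : Nat) : Nat :=
  match fuel with
  | 0 => i
  | f + 1 =>
    if i + 1 < nums.length ∧ nums.getD (i + 1) 0 ≥ nums.getD i 0 then ascendI nums f (i + 1) else i

-- outer loop 'while i + 1 < n: …', carrying the running profit
def runsI (nums : List Int) (fuel : Nat) (profit : Int) (i : Nat) : Int :=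
  match fuel with
  | 0 => profit
  | f + 1 =>
    if i + 1 < nums.length then
      let j := descendI nums nums.length i
      let valley := nums.getD j 0
      let k := ascendI nums nums.length j
      runsI nums f (profit + (nums.getD k 0 - valley)) k
    else profit

def solve_alt (nums : List Int) : Int := runsI nums nums.length 0 0

-- ===== PRECONDITION & SPEC =====
-- Pre_ excludes exactly the empty list, on which Python A raises IndexError reading the first element; B returns the empty-market profit there.
def Pre_solve (nums : List Int) : Prop := nums ≠ []
instance (nums : List Int) : Decidable (Pre_solve nums) := by unfold Pre_solve; infer_instance
def pvWitness_solve : List Int := [7, 1, 5, 3, 6, 4]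

def Spec_solve (nums : List Int) (out : Int) : Prop := out = solve_alt nums
instance (nums : List Int) (out : Int) : Decidable (Spec_solve nums out) := by unfold Spec_solve; infer_instance

-- ===== CLAIM (what is proved, stated in full; the proofs are below) =====
def Claim_equal_solve : Prop := ∀ (nums : List Int), Dom_solve nums → Pre_solve nums → Spec_solve nums (solve nums)

-- ===== LEMMAS AND PROOFS =====

-- sum of positive consecutive differences, structurally (the common characterisation of both programs)
def posSum (cur : Int) (rest : List Int) : Int :=
  match rest with
  | [] => 0
  | x :: xs => (if x - cur > 0 then x - cur else 0) + posSum x xs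

def stepA (s : Int × Int) (x : Int) : Int × Int :=
  (if x - s.2 > 0 then s.1 + (x - s.2) else s.1, x)

theorem foldl_stepA (rest : List Int) (acc cur : Int) :
    (rest.foldl stepA (acc, cur)).1 = acc + posSum cur rest := by
  induction rest generalizing acc cur with
  | nil => simp [posSum]
  | cons x xs ih =>
    simp only [List.foldl_cons, posSum, stepA]
    rw [ih]
    split <;> ring

theorem solve_eq_posSum (c : Int) (rest : List Int) :
    solve (c :: rest) = posSum c rest := by
  show ((PySem.List.pyRange 1 ((c :: rest).length : Int) 1).foldl
      (fun (s : Int × Int) i => stepA s (PySem.List.pyGetD (c :: rest) i 0)) (0, PySem.List.pyGetD (c :: rest) 0 0)).1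
    = posSum c rest
  rw [PySem.List.foldl_pyRange_pyGetD' (c :: rest) 0 stepA _ (by norm_num : (0:Int) ≤ 1)]
  simpa [PySem.List.pyGetD_zero_cons] using foldl_stepA rest 0 c

-- the positive-difference sum of the suffix starting at index i
def posFrom (nums : List Int) (i : Nat) : Int := posSum (nums.getD i 0) (nums.drop (i + 1))

theorem posFrom_succ (nums : List Int) (i : Nat) (h : i + 1 < nums.length) :
    posFrom nums i
      = (if nums.getD (i + 1) 0 - nums.getD i 0 > 0 then nums.getD (i + 1) 0 - nums.getD i 0 else 0)
        + posFrom nums (i + 1) := by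
  unfold posFrom
  rw [List.drop_eq_getElem_cons h]
  simp only [posSum, List.getD_eq_getElem nums 0 h]

theorem posFrom_last (nums : List Int) (i : Nat) (h : ¬ i + 1 < nums.length) :
    posFrom nums i = 0 := by
  unfold posFrom
  rw [List.drop_eq_nil_of_le (by omega)]
  rfl

theorem descendI_ge (nums : List Int) (fuel i : Nat) : i ≤ descendI nums fuel i := by
  induction fuel generalizing i with
  | zero => simp [descendI]
  | succ f ih =>
    rw [descendI]
    split
    · exact le_trans (by omega) (ih (i + 1))
    · exact le_rfl

theorem ascendI_ge (nums : List Int) (fuel i : Nat) : i ≤ ascendI nums fuel i := by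
  induction fuel generalizing i with
  | zero => simp [ascendI]
  | succ f ih =>
    rw [ascendI]
    split
    · exact le_trans (by omega) (ih (i + 1))
    · exact le_rfl

theorem descendI_exit (nums : List Int) (fuel i : Nat) (hf : nums.length ≤ fuel + i + 1) :
    ¬ (descendI nums fuel i + 1 < nums.length ∧
        nums.getD (descendI nums fuel i + 1) 0 ≤ nums.getD (descendI nums fuel i) 0) := by
  induction fuel generalizing i with
  | zero => rw [descendI]; intro hc; omega
  | succ f ih =>
    rw [descendI]
    split
    · exact ih (i + 1) (by omega)
    · next h => exact h

theorem ascendI_step (nums : List Int) (fuel i : Nat) (hfuel : 0 < fuel)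
    (h : i + 1 < nums.length ∧ nums.getD (i + 1) 0 ≥ nums.getD i 0) :
    i + 1 ≤ ascendI nums fuel i := by
  cases fuel with
  | zero => omega
  | succ f => rw [ascendI, if_pos h]; exact ascendI_ge nums f (i + 1)

theorem outer_step_gt (nums : List Int) (i : Nat) (h : i + 1 < nums.length) :
    i + 1 ≤ ascendI nums nums.length (descendI nums nums.length i) := by
  by_cases hj : descendI nums nums.length i = i
  · have hex := descendI_exit nums nums.length i (by omega)
    rw [hj] at hex
    have hgt : nums.getD (i + 1) 0 ≥ nums.getD i 0 := by
      rcases not_and_or.mp hex with h' | h'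
      · exact absurd h h'
      · omega
    rw [hj]
    exact ascendI_step nums nums.length i (by omega) ⟨h, hgt⟩
  · have h1 := descendI_ge nums nums.length i
    have h2 := ascendI_ge nums nums.length (descendI nums nums.length i)
    omega

theorem descendI_posFrom (nums : List Int) (fuel i : Nat) :
    posFrom nums i = posFrom nums (descendI nums fuel i) := by
  induction fuel generalizing i with
  | zero => rw [descendI]
  | succ f ih =>
    rw [descendI]
    split
    · next hc =>
      rw [← ih (i + 1), posFrom_succ nums i hc.1]
      have h0 : (if nums.getD (i + 1) 0 - nums.getD i 0 > 0 then nums.getD (i + 1) 0 - nums.getD i 0 else 0) = 0 := by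
        have := hc.2; omega
      rw [h0]; ring
    · rfl

theorem ascendI_posFrom (nums : List Int) (fuel i : Nat) :
    posFrom nums i
      = (nums.getD (ascendI nums fuel i) 0 - nums.getD i 0) + posFrom nums (ascendI nums fuel i) := by
  induction fuel generalizing i with
  | zero => rw [ascendI]; ring
  | succ f ih =>
    rw [ascendI]
    split
    · next hc =>
      rw [posFrom_succ nums i hc.1]
      have h0 : (if nums.getD (i + 1) 0 - nums.getD i 0 > 0 then nums.getD (i + 1) 0 - nums.getD i 0 else 0)
          = nums.getD (i + 1) 0 - nums.getD i 0 := by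
        have := hc.2; omega
      rw [h0, ih (i + 1)]; ring
    · ring

theorem runsI_eq_posFrom (nums : List Int) (fuel : Nat) (profit : Int) (i : Nat)
    (hf : nums.length ≤ fuel + i + 1) :
    runsI nums fuel profit i = profit + posFrom nums i := by
  induction fuel generalizing profit i with
  | zero => rw [runsI, posFrom_last nums i (by omega)]; ring
  | succ f ih =>
    rw [runsI]
    split
    · next h =>
      have hk := outer_step_gt nums i h
      rw [ih _ _ (by omega)]
      rw [descendI_posFrom nums nums.length i,
          ascendI_posFrom nums nums.length (descendI nums nums.length i)]
      ring
    · next h => rw [posFrom_last nums i h]; ring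

-- ===== VERDICT (by name: the statement is the Claim_ definition above) =====
theorem solve_spec : Claim_equal_solve := by
  intro nums _ hpre
  unfold Spec_solve
  cases nums with
  | nil => exact absurd rfl hpre
  | cons c rest =>
    rw [solve_eq_posSum]
    show posSum c rest = runsI (c :: rest) (c :: rest).length 0 0
    rw [runsI_eq_posFrom (c :: rest) (c :: rest).length 0 0 (by omega)]
    simp [posFrom]
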